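-- pv_equiv track=rewrite | github.com/pypi-data/pypi-mirror-230 | packages/pyunixs/pyunixs-0.1.tar.gz/pyunixs-0.1/pyunix/testing.py | letter_parser
-- ===== SOURCE A (Python) =====
-- def letter_parser(cmd, raw_execution, single_quotes, double_quotes):
--     cmd_list = []
--     tmp = ""
--
--     for i,letter in enumerate(cmd):
--
--         if letter == "'":
--             single_quotes += 1
--         if letter == '"':
--             double_quotes += 1
--
--
--         if letter in ['|', '>', '<'] and single_quotes % 2 == 0 and double_quotes % 2 == 0:
--             cmd_list.append(tmp)
--             cmd_list.append(letter)
--             tmp = ""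
--             raw_execution = 0
--
--         else:
--             tmp = tmp + letter
--
--     if tmp != "":
--         cmd_list.append(tmp)
--
--     return raw_execution, cmd_list, single_quotes, double_quotes
-- ===== SOURCE B (Python) =====
-- def letter_parser(cmd, raw_execution, single_quotes, double_quotes):
--     # Pass 1: record indices of |/>/< that are outside quotes (running parities
--     # seeded with the passed-in counts), and the final quote counts.
--     idxs = []
--     for i, ch in enumerate(cmd):
--         if ch == "'":
--             single_quotes += 1
--         elif ch == '"':
--             double_quotes += 1
--         elif ch in '|><' and single_quotes % 2 == 0 and double_quotes % 2 == 0: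
--             idxs.append(i)
--     # Pass 2: build the pieces by slicing between consecutive active delimiters;
--     # intermediate empty slices are kept, the trailing slice only if non-empty.
--     cmd_list = []
--     start = 0
--     for i in idxs:
--         cmd_list.append(cmd[start:i])
--         cmd_list.append(cmd[i])
--         start = i + 1
--     if start < len(cmd):
--         cmd_list.append(cmd[start:])
--     if idxs:
--         raw_execution = 0
--     return raw_execution, cmd_list, single_quotes, double_quotes
-- ===== Notes on version B (the rewrite author's own statement) =====
-- stated objective: alternative
-- what changed: A builds the segments in one pass with a growing tmp buffer; B first scans once to collect the indices of pipe/redirect characters outside quotes (and the quote totals), then builds the list by slicing the string between consecutive delimiter indices.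
import Mathlib
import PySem

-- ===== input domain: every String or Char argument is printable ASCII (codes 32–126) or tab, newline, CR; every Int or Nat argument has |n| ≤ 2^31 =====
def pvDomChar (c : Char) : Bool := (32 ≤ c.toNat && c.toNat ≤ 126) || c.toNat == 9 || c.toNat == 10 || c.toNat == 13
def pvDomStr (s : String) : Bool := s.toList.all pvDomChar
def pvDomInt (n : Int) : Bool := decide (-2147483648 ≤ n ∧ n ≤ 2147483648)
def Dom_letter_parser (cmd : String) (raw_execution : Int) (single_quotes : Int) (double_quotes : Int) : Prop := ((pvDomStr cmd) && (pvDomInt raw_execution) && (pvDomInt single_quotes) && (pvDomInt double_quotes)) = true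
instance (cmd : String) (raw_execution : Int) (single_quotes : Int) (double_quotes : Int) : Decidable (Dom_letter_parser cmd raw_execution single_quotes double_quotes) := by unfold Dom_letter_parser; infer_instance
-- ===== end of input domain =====

-- B replaces A's single tmp-buffer pass by an index-collecting pass plus slicing; same results, alternative structure (not claimed faster).

-- ===== PORT A =====
-- A's loop; state = (cmd_list, tmp, raw_execution, single_quotes, double_quotes)
def lpA_loop : List Char → List (List Char) → List Char → Int → Int → Int →
    List (List Char) × List Char × Int × Int × Int
  | [], acc, tmp, raw, s, d => (acc, tmp, raw, s, d)
  | c :: rest, acc, tmp, raw, s, d =>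
    let s := if c == '\'' then s + 1 else s
    let d := if c == '"' then d + 1 else d
    if (c == '|' || c == '>' || c == '<') && PySem.Int.mod s 2 == 0 && PySem.Int.mod d 2 == 0 then
      lpA_loop rest (acc ++ [tmp, [c]]) [] 0 s d
    else
      lpA_loop rest acc (tmp ++ [c]) raw s d

-- (lpA_loop …) = (cmd_list, tmp, raw_execution, single_quotes, double_quotes); final 'if tmp != ""' append
def letter_parser (cmd : String) (raw_execution : Int) (single_quotes : Int) (double_quotes : Int) : Int × List String × Int × Int :=
  ((lpA_loop cmd.toList [] [] raw_execution single_quotes double_quotes).2.2.1,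
   (if (lpA_loop cmd.toList [] [] raw_execution single_quotes double_quotes).2.1 ≠ [] then
      (lpA_loop cmd.toList [] [] raw_execution single_quotes double_quotes).1 ++
        [(lpA_loop cmd.toList [] [] raw_execution single_quotes double_quotes).2.1]
    else (lpA_loop cmd.toList [] [] raw_execution single_quotes double_quotes).1).map String.mk,
   (lpA_loop cmd.toList [] [] raw_execution single_quotes double_quotes).2.2.2.1,
   (lpA_loop cmd.toList [] [] raw_execution single_quotes double_quotes).2.2.2.2)

-- ===== PORT B =====
-- B pass 1: indices of |/>/< outside quotes, plus the final quote counts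
def lpB_idxs : List Char → Nat → Int → Int → List Nat × Int × Int
  | [], _, s, d => ([], s, d)
  | c :: rest, i, s, d =>
    if c == '\'' then lpB_idxs rest (i + 1) (s + 1) d
    else if c == '"' then lpB_idxs rest (i + 1) s (d + 1)
    else if (c == '|' || c == '>' || c == '<') && PySem.Int.mod s 2 == 0 && PySem.Int.mod d 2 == 0 then
      let r := lpB_idxs rest (i + 1) s d
      (i :: r.1, r.2.1, r.2.2)
    else lpB_idxs rest (i + 1) s d

-- B pass 2: cmd[start:i] = (l.drop start).take (i-start) and cmd[i] = (l.drop i).take 1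
-- (exact: every produced index satisfies 0 ≤ start ≤ i < len); trailing slice only if non-empty
def lpB_build (l : List Char) : List Nat → Nat → List (List Char)
  | [], start => if start < l.length then [l.drop start] else []
  | i :: is, start => ((l.drop start).take (i - start)) :: ((l.drop i).take 1) :: lpB_build l is (i + 1)

def letter_parser_alt (cmd : String) (raw_execution : Int) (single_quotes : Int) (double_quotes : Int) : Int × List String × Int × Int :=
  ((if (lpB_idxs cmd.toList 0 single_quotes double_quotes).1.isEmpty then raw_execution else 0),
   (lpB_build cmd.toList (lpB_idxs cmd.toList 0 single_quotes double_quotes).1 0).map String.mk,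
   (lpB_idxs cmd.toList 0 single_quotes double_quotes).2.1,
   (lpB_idxs cmd.toList 0 single_quotes double_quotes).2.2)

-- ===== PRECONDITION & SPEC =====
def Spec_letter_parser (cmd : String) (raw_execution : Int) (single_quotes : Int) (double_quotes : Int) (out : Int × List String × Int × Int) : Prop := out = letter_parser_alt cmd raw_execution single_quotes double_quotes
instance (cmd : String) (raw_execution : Int) (single_quotes : Int) (double_quotes : Int) (out : Int × List String × Int × Int) : Decidable (Spec_letter_parser cmd raw_execution single_quotes double_quotes out) := by unfold Spec_letter_parser; infer_instance

-- ===== CLAIM (what is proved, stated in full; the proofs are below) =====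
def Claim_equal_letter_parser : Prop := ∀ (cmd : String) (raw_execution : Int) (single_quotes : Int) (double_quotes : Int), Dom_letter_parser cmd raw_execution single_quotes double_quotes → Spec_letter_parser cmd raw_execution single_quotes double_quotes (letter_parser cmd raw_execution single_quotes double_quotes)

-- ===== LEMMAS AND PROOFS =====

-- segments produced strictly before the final tmp piece
def lpSegs (l : List Char) : List Nat → Nat → List (List Char)
  | [], _ => []
  | i :: is, start => ((l.drop start).take (i - start)) :: ((l.drop i).take 1) :: lpSegs l is (i + 1)

-- the start position of the final tmp piece
def lpLast : List Nat → Nat → Nat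
  | [], start => start
  | i :: is, _ => lpLast is (i + 1)

lemma lpB_build_eq (l : List Char) (idxs : List Nat) : ∀ start,
    lpB_build l idxs start = lpSegs l idxs start ++
      (if lpLast idxs start < l.length then [l.drop (lpLast idxs start)] else []) := by
  induction idxs with
  | nil => intro start; simp [lpB_build, lpSegs, lpLast]
  | cons i is ih => intro start; simp [lpB_build, lpSegs, lpLast, ih]

lemma lp_take_snoc (l : List Char) (j k : Nat) (c : Char) (rest : List Char)
    (hj : j ≤ k) (h : l.drop k = c :: rest) :
    (l.drop j).take (k - j) ++ [c] = (l.drop j).take (k + 1 - j) := by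
  have hk1 : k + 1 - j = (k - j) + 1 := by omega
  have hc : (l.drop j)[k - j]? = some c := by
    rw [List.getElem?_drop, show j + (k - j) = k by omega, ← Nat.add_zero k,
      ← List.getElem?_drop, h]
    rfl
  rw [hk1, List.take_add_one, hc]
  rfl

lemma lp_drop_succ (l : List Char) (k : Nat) (c : Char) (rest : List Char)
    (h : l.drop k = c :: rest) : l.drop (k + 1) = rest := by
  have : l.drop (k + 1) = (l.drop k).drop 1 := by rw [List.drop_drop]
  rw [this, h]
  rfl

lemma lp_main (chars : List Char) : ∀ (l : List Char) (k j : Nat) (acc : List (List Char)) (raw s d : Int),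
    chars = l.drop k → j ≤ k →
    lpA_loop chars acc ((l.drop j).take (k - j)) raw s d =
      (acc ++ lpSegs l (lpB_idxs chars k s d).1 j,
       l.drop (lpLast (lpB_idxs chars k s d).1 j),
       (if (lpB_idxs chars k s d).1.isEmpty then raw else 0),
       (lpB_idxs chars k s d).2.1, (lpB_idxs chars k s d).2.2) := by
  induction chars with
  | nil =>
    intro l k j acc raw s d h hj
    have hlen : l.length ≤ k := by
      by_contra hlt
      exact absurd h.symm (by simp [List.drop_eq_nil_iff]; omega)
    have htake : (l.drop j).take (k - j) = l.drop j :=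
      List.take_of_length_le (by simp; omega)
    simp [lpA_loop, lpB_idxs, lpSegs, lpLast, htake]
  | cons c rest ih =>
    intro l k j acc raw s d h hj
    have hk : k < l.length := by
      by_contra hk
      rw [List.drop_eq_nil_of_le (by omega)] at h
      simp at h
    have hrest : rest = l.drop (k + 1) := (lp_drop_succ l k c rest h.symm).symm
    have hc1 : (l.drop k).take 1 = [c] := by rw [← h]; rfl
    by_cases hq : c = '\''
    · subst hq
      have hsnoc := lp_take_snoc l j k '\'' rest hj h.symm
      have h2 := ih l (k + 1) j acc raw (s + 1) d hrest (by omega)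
      simpa [lpA_loop, lpB_idxs, hsnoc] using h2
    · by_cases hqq : c = '"'
      · subst hqq
        have hsnoc := lp_take_snoc l j k '"' rest hj h.symm
        have h2 := ih l (k + 1) j acc raw s (d + 1) hrest (by omega)
        simpa [lpA_loop, lpB_idxs, hsnoc] using h2
      · have hq' : (c == '\'') = false := by simp [hq]
        have hqq' : (c == '"') = false := by simp [hqq]
        by_cases hdel : (((c = '|' ∨ c = '>') ∨ c = '<') ∧ 2 ∣ s) ∧ 2 ∣ d
        · have h2 := ih l (k + 1) (k + 1) (acc ++ [(l.drop j).take (k - j), [c]]) 0 s d hrest (by omega)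
          rw [show (k + 1) - (k + 1) = 0 by omega] at h2
          simp only [List.take_zero] at h2
          simpa [lpA_loop, lpB_idxs, hq', hqq', hdel, lpSegs, lpLast, hc1] using h2
        · have hsnoc := lp_take_snoc l j k c rest hj h.symm
          have h2 := ih l (k + 1) j acc raw s d hrest (by omega)
          simpa [lpA_loop, lpB_idxs, hq', hqq', hdel, hsnoc] using h2

-- ===== VERDICT (by name: the statement is the Claim_ definition above) =====
theorem letter_parser_spec : Claim_equal_letter_parser := by
  intro cmd raw s d _
  unfold Spec_letter_parser letter_parser letter_parser_alt
  have hmain := lp_main cmd.toList cmd.toList 0 0 [] raw s d (by simp) (le_refl 0)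
  simp only [List.drop_zero, Nat.sub_zero, List.take_zero] at hmain
  rw [hmain]
  rw [lpB_build_eq]
  set idxs := (lpB_idxs cmd.toList 0 s d).1 with hidxs
  set m := lpLast idxs 0 with hm
  by_cases hlt : m < cmd.length
  · have hne : cmd.toList.drop m ≠ [] := by
      simp [List.drop_eq_nil_iff]; omega
    simp [hlt, hne]
  · have hnil : cmd.toList.drop m = [] := by
      rw [List.drop_eq_nil_iff]; simp; omega
    simp [hlt, hnil]
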